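-- pv_equiv track=rewrite | github.com/pritamban/PyRandomPoemGenerator | PA4.py | get_next_word_counts
-- ===== SOURCE A (Python) =====
-- def get_next_word_counts(words, mat, index) -> list[list]:
--   """Takes as a parameter a list of words of length n, a 2D list of size n x n,
--   and a dictionary where the keys are a word and the values are an int index.
--   The matrix should be indexed as mat[current_word][next_word].
--   This function tallies up the number of times a word is followed by another word."""
--
--   for i in range(len(words) - 1):
--     word1 = words[i]
--     word2 = words[i + 1]
--     word1_index = index[word1]
--     word2_index = index[word2]
--     mat[word1_index][word2_index] += 1
--   return mat
-- ===== SOURCE B (Python) =====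
-- def get_next_word_counts(words, mat, index) -> list[list]:
--   """Two-phase rewrite: first aggregate adjacent-pair frequencies into a dict,
--   then apply each aggregated count to the matrix in one write per distinct pair.
--   Mutates mat in place and returns it, like the original."""
--   pairs = {}
--   for pair in zip(words, words[1:]):
--     pairs[pair] = pairs.get(pair, 0) + 1
--   for (word1, word2), count in pairs.items():
--     mat[index[word1]][index[word2]] += count
--   return mat
-- ===== Notes on version B (the rewrite author's own statement) =====
-- stated objective: alternative
-- what changed: Replaces the single per-pair increment pass with a two-phase structure: one pass aggregates adjacent-pair frequencies into a dict, a second pass applies each aggregated count to the matrix with a single += per distinct pair.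
import Mathlib
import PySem

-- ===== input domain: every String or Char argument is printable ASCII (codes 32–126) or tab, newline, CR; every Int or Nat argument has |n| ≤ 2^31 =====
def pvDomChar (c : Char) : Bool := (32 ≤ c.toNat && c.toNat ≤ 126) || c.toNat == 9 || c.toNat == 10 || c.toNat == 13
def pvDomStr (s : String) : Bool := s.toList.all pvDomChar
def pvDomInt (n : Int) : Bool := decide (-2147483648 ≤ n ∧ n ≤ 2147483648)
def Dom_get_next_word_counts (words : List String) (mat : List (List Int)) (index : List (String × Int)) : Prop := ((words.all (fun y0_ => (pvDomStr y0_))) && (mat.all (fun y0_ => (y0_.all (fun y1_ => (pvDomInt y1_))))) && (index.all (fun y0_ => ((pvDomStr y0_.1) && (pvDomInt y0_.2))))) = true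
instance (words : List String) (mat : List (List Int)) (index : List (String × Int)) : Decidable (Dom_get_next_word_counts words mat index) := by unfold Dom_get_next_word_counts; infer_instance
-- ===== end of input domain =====

-- B replaces A's single per-pair increment pass by aggregate-then-apply (a pair-frequency
-- dict built first, then one += per distinct pair); return value proved equal, and both
-- Pythons mutate mat in place identically (equivalence here is about the return value).

-- ===== PORT A =====
def get_next_word_counts (words : List String) (mat : List (List Int)) (index : List (String × Int)) : List (List Int) :=
  (PySem.List.pyRange 0 ((words.length : Int) - 1) 1).foldl (fun mat i =>
    let word1 := PySem.List.pyGetD words i ""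
    let word2 := PySem.List.pyGetD words (i + 1) ""
    let word1_index := (PySem.Dict.ofList index).getD word1 0
    let word2_index := (PySem.Dict.ofList index).getD word2 0
    let row := PySem.List.pyGetD mat word1_index []
    PySem.List.pySetD mat word1_index
      (PySem.List.pySetD row word2_index (PySem.List.pyGetD row word2_index 0 + 1))) mat

-- ===== PORT B =====
-- mat[index[w1]][index[w2]] += count  (one application step of B's second loop)
def pvApplyCount (idx : PySem.Dict String Int) (mat : List (List Int)) (pc : (String × String) × Int) : List (List Int) :=
  let i := idx.getD pc.1.1 0
  let j := idx.getD pc.1.2 0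
  let row := PySem.List.pyGetD mat i []
  PySem.List.pySetD mat i (PySem.List.pySetD row j (PySem.List.pyGetD row j 0 + pc.2))

def get_next_word_counts_alt (words : List String) (mat : List (List Int)) (index : List (String × Int)) : List (List Int) :=
  let pairs := (words.zip (PySem.List.slice words (some 1) none)).foldl
      (fun d p => d.insert p (d.getD p 0 + 1)) PySem.Dict.empty
  pairs.items.foldl (pvApplyCount (PySem.Dict.ofList index)) mat

-- ===== PRECONDITION & SPEC =====
-- Pre_ excludes exactly the inputs where Python A raises: a KeyError (an adjacent word
-- missing from index) or an IndexError (a looked-up row/column index out of range).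
def Pre_get_next_word_counts (words : List String) (mat : List (List Int)) (index : List (String × Int)) : Prop :=
  ∀ p ∈ words.zip words.tail,
    (PySem.Dict.ofList index).contains p.1 = true ∧
    (PySem.Dict.ofList index).contains p.2 = true ∧
    PySem.Raise.InRange mat.length ((PySem.Dict.ofList index).getD p.1 0) ∧
    PySem.Raise.InRange (PySem.List.pyGetD mat ((PySem.Dict.ofList index).getD p.1 0) []).length
      ((PySem.Dict.ofList index).getD p.2 0)
instance (words : List String) (mat : List (List Int)) (index : List (String × Int)) : Decidable (Pre_get_next_word_counts words mat index) := by unfold Pre_get_next_word_counts; infer_instance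

def pvWitness_get_next_word_counts : List String × List (List Int) × (List (String × Int)) :=
  (["a", "b", "a"], [[0, 0], [0, 0]], [("a", 0), ("b", 1)])

def Spec_get_next_word_counts (words : List String) (mat : List (List Int)) (index : List (String × Int)) (out : List (List Int)) : Prop := out = get_next_word_counts_alt words mat index
instance (words : List String) (mat : List (List Int)) (index : List (String × Int)) (out : List (List Int)) : Decidable (Spec_get_next_word_counts words mat index out) := by unfold Spec_get_next_word_counts; infer_instance

-- ===== CLAIM (what is proved, stated in full; the proofs are below) =====
def Claim_equal_get_next_word_counts : Prop := ∀ (words : List String) (mat : List (List Int)) (index : List (String × Int)), Dom_get_next_word_counts words mat index → Pre_get_next_word_counts words mat index → Spec_get_next_word_counts words mat index (get_next_word_counts words mat index)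

-- ===== LEMMAS AND PROOFS =====

-- mat[i][j] += c as one total operation (both ports' write step has this shape)
def pvBump (m : List (List Int)) (i j c : Int) : List (List Int) :=
  PySem.List.pySetD m i
    (PySem.List.pySetD (PySem.List.pyGetD m i []) j
      (PySem.List.pyGetD (PySem.List.pyGetD m i []) j 0 + c))

theorem pvApplyCount_eq (idx : PySem.Dict String Int) (m : List (List Int)) (pc : (String × String) × Int) :
    pvApplyCount idx m pc = pvBump m (idx.getD pc.1.1 0) (idx.getD pc.1.2 0) pc.2 := rfl

-- resolved nat-index point update
def pvPU (m : List (List Int)) (a b : Nat) (c : Int) : List (List Int) :=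
  m.set a ((m.getD a []).set b ((m.getD a []).getD b 0 + c))

theorem pvIdx_some_lt {n : Nat} {i : Int} {a : Nat} (h : PySem.List.pyIdx? n i = some a) : a < n := by
  unfold PySem.List.pyIdx? at h
  split_ifs at h <;> simp_all <;> omega

theorem pvGetD_of_idx {α : Type} {xs : List α} {i : Int} {a : Nat} (d : α)
    (h : PySem.List.pyIdx? xs.length i = some a) :
    PySem.List.pyGetD xs i d = xs.getD a d := by
  have ha := pvIdx_some_lt h
  simp [PySem.List.pyGetD, PySem.List.pyGet?, h, List.getElem?_eq_getElem ha]

theorem pvSetD_of_idx {α : Type} {xs : List α} {i : Int} {a : Nat} (v : α)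
    (h : PySem.List.pyIdx? xs.length i = some a) :
    PySem.List.pySetD xs i v = xs.set a v := by
  simp [PySem.List.pySetD, PySem.List.pySet?, h]

theorem pvSetD_of_none {α : Type} {xs : List α} {i : Int} (v : α)
    (h : PySem.List.pyIdx? xs.length i = none) :
    PySem.List.pySetD xs i v = xs := by
  simp [PySem.List.pySetD, PySem.List.pySet?, h]

theorem pvBump_none1 {m : List (List Int)} {i : Int} (j c : Int)
    (h : PySem.List.pyIdx? m.length i = none) : pvBump m i j c = m := by
  unfold pvBump
  rw [pvSetD_of_none _ h]

theorem pvBump_none2 {m : List (List Int)} {i j : Int} {a : Nat} (c : Int)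
    (h1 : PySem.List.pyIdx? m.length i = some a)
    (h2 : PySem.List.pyIdx? (m.getD a []).length j = none) : pvBump m i j c = m := by
  have ha := pvIdx_some_lt h1
  unfold pvBump
  rw [pvGetD_of_idx _ h1, pvSetD_of_none _ h2, pvSetD_of_idx _ h1,
    List.getD_eq_getElem _ _ ha, List.set_getElem_self]

theorem pvBump_valid {m : List (List Int)} {i j : Int} {a b : Nat} (c : Int)
    (h1 : PySem.List.pyIdx? m.length i = some a)
    (h2 : PySem.List.pyIdx? (m.getD a []).length j = some b) :
    pvBump m i j c = pvPU m a b c := by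
  unfold pvBump pvPU
  rw [pvGetD_of_idx _ h1, pvGetD_of_idx _ h2, pvSetD_of_idx _ h2, pvSetD_of_idx _ h1]

theorem pvPU_length (m : List (List Int)) (a b : Nat) (c : Int) :
    (pvPU m a b c).length = m.length := by
  simp [pvPU]

theorem pvPU_getD_length (m : List (List Int)) (a b : Nat) (c : Int) (x : Nat) :
    ((pvPU m a b c).getD x []).length = (m.getD x []).length := by
  unfold pvPU
  by_cases hx : x < m.length
  · by_cases hax : a = x
    · subst hax
      rw [List.getD_eq_getElem _ _ (by simpa using hx), List.getElem_set_self,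
        List.getD_eq_getElem _ _ hx]
      simp
    · rw [List.getD_eq_getElem _ _ (by simpa using hx), List.getElem_set_ne hax,
        List.getD_eq_getElem _ _ hx]
  · rw [List.getD_eq_default _ _ (by simpa using not_lt.mp hx),
      List.getD_eq_default _ _ (not_lt.mp hx)]

theorem pvPU_merge (m : List (List Int)) (a b : Nat) (c1 c2 : Int)
    (ha : a < m.length) (hb : b < (m.getD a []).length) :
    pvPU (pvPU m a b c1) a b c2 = pvPU m a b (c1 + c2) := by
  unfold pvPU
  set r := m.getD a [] with hr
  set v := r.getD b 0 with hv
  have h1 : (m.set a (r.set b (v + c1))).getD a [] = r.set b (v + c1) := by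
    rw [List.getD_eq_getElem _ _ (by simpa using ha), List.getElem_set_self]
  rw [h1]
  have h2 : (r.set b (v + c1)).getD b 0 = v + c1 := by
    rw [List.getD_eq_getElem _ _ (by simpa using hb), List.getElem_set_self]
  rw [h2, List.set_set, List.set_set]
  ring_nf

theorem pvPU_comm (m : List (List Int)) (a b a' b' : Nat) (c c' : Int)
    (ha : a < m.length) (hb : b < (m.getD a []).length)
    (ha' : a' < m.length) (hb' : b' < (m.getD a' []).length) :
    pvPU (pvPU m a b c) a' b' c' = pvPU (pvPU m a' b' c') a b c := by
  by_cases haa : a = a'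
  · subst haa
    by_cases hbb : b = b'
    · subst hbb
      rw [pvPU_merge m a b c c' ha hb, pvPU_merge m a b c' c ha hb, add_comm]
    · unfold pvPU
      set r := m.getD a [] with hr
      set vb := r.getD b 0 with hvb
      set vb' := r.getD b' 0 with hvb'
      have hget : ∀ w : List Int, (m.set a w).getD a [] = w := fun w => by
        rw [List.getD_eq_getElem _ _ (by simpa using ha), List.getElem_set_self]
      rw [hget, hget, List.set_set, List.set_set]
      congr 1
      have e1 : (r.set b (vb + c)).getD b' 0 = vb' := by
        rw [List.getD_eq_getElem _ _ (by simpa using hb'), List.getElem_set_ne hbb, hvb',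
          List.getD_eq_getElem _ _ (by simpa using hb')]
      have e2 : (r.set b' (vb' + c')).getD b 0 = vb := by
        rw [List.getD_eq_getElem _ _ (by simpa using hb), List.getElem_set_ne (Ne.symm hbb), hvb,
          List.getD_eq_getElem _ _ (by simpa using hb)]
      rw [e1, e2, List.set_comm _ _ hbb]
  · unfold pvPU
    have hget1 : ∀ w : List Int, (m.set a w).getD a' [] = m.getD a' [] := fun w => by
      rw [List.getD_eq_getElem _ _ (by simpa using ha'), List.getElem_set_ne haa,
        List.getD_eq_getElem _ _ ha']
    have hget2 : ∀ w : List Int, (m.set a' w).getD a [] = m.getD a [] := fun w => by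
      rw [List.getD_eq_getElem _ _ (by simpa using ha), List.getElem_set_ne (Ne.symm haa),
        List.getD_eq_getElem _ _ ha]
    rw [hget1, hget2, List.set_comm _ _ haa]

theorem pvBump_length (m : List (List Int)) (i j c : Int) : (pvBump m i j c).length = m.length := by
  cases h1 : PySem.List.pyIdx? m.length i with
  | none => rw [pvBump_none1 j c h1]
  | some a =>
    cases h2 : PySem.List.pyIdx? (m.getD a []).length j with
    | none => rw [pvBump_none2 c h1 h2]
    | some b => rw [pvBump_valid c h1 h2, pvPU_length]

theorem pvBump_getD_length (m : List (List Int)) (i j c : Int) (x : Nat) :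
    ((pvBump m i j c).getD x []).length = (m.getD x []).length := by
  cases h1 : PySem.List.pyIdx? m.length i with
  | none => rw [pvBump_none1 j c h1]
  | some a =>
    cases h2 : PySem.List.pyIdx? (m.getD a []).length j with
    | none => rw [pvBump_none2 c h1 h2]
    | some b => rw [pvBump_valid c h1 h2, pvPU_getD_length]

theorem pvBump_merge (m : List (List Int)) (i j c1 c2 : Int) :
    pvBump (pvBump m i j c1) i j c2 = pvBump m i j (c1 + c2) := by
  cases h1 : PySem.List.pyIdx? m.length i with
  | none =>
    rw [pvBump_none1 j c1 h1, pvBump_none1 j c2 h1, pvBump_none1 j (c1 + c2) h1]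
  | some a =>
    cases h2 : PySem.List.pyIdx? (m.getD a []).length j with
    | none =>
      rw [pvBump_none2 c1 h1 h2, pvBump_none2 c2 h1 h2, pvBump_none2 (c1 + c2) h1 h2]
    | some b =>
      have h1' : PySem.List.pyIdx? (pvPU m a b c1).length i = some a := by
        rw [pvPU_length]; exact h1
      have h2' : PySem.List.pyIdx? ((pvPU m a b c1).getD a []).length j = some b := by
        rw [pvPU_getD_length]; exact h2
      rw [pvBump_valid c1 h1 h2, pvBump_valid c2 h1' h2', pvBump_valid (c1 + c2) h1 h2,
        pvPU_merge m a b c1 c2 (pvIdx_some_lt h1) (pvIdx_some_lt h2)]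

theorem pvBump_comm (m : List (List Int)) (i j i' j' c c' : Int) :
    pvBump (pvBump m i j c) i' j' c' = pvBump (pvBump m i' j' c') i j c := by
  cases h1 : PySem.List.pyIdx? m.length i with
  | none =>
    rw [pvBump_none1 j c h1,
      pvBump_none1 j c (show PySem.List.pyIdx? (pvBump m i' j' c').length i = none by
        rw [pvBump_length]; exact h1)]
  | some a =>
    cases h2 : PySem.List.pyIdx? (m.getD a []).length j with
    | none =>
      rw [pvBump_none2 c h1 h2,
        pvBump_none2 c (show PySem.List.pyIdx? (pvBump m i' j' c').length i = some a by
          rw [pvBump_length]; exact h1)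
          (show PySem.List.pyIdx? ((pvBump m i' j' c').getD a []).length j = none by
            rw [pvBump_getD_length]; exact h2)]
    | some b =>
      cases h1' : PySem.List.pyIdx? m.length i' with
      | none =>
        rw [pvBump_none1 j' c' h1',
          pvBump_none1 j' c' (show PySem.List.pyIdx? (pvBump m i j c).length i' = none by
            rw [pvBump_length]; exact h1')]
      | some a' =>
        cases h2' : PySem.List.pyIdx? (m.getD a' []).length j' with
        | none =>
          rw [pvBump_none2 c' h1' h2',
            pvBump_none2 c' (show PySem.List.pyIdx? (pvBump m i j c).length i' = some a' by
              rw [pvBump_length]; exact h1')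
              (show PySem.List.pyIdx? ((pvBump m i j c).getD a' []).length j' = none by
                rw [pvBump_getD_length]; exact h2')]
        | some b' =>
          rw [pvBump_valid c h1 h2, pvBump_valid c' h1' h2']
          rw [pvBump_valid c' (show PySem.List.pyIdx? (pvPU m a b c).length i' = some a' by
              rw [pvPU_length]; exact h1')
              (show PySem.List.pyIdx? ((pvPU m a b c).getD a' []).length j' = some b' by
                rw [pvPU_getD_length]; exact h2'),
            pvBump_valid c (show PySem.List.pyIdx? (pvPU m a' b' c').length i = some a by
              rw [pvPU_length]; exact h1)
              (show PySem.List.pyIdx? ((pvPU m a' b' c').getD a []).length j = some b by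
                rw [pvPU_getD_length]; exact h2)]
          exact pvPU_comm m a b a' b' c c' (pvIdx_some_lt h1) (pvIdx_some_lt h2)
            (pvIdx_some_lt h1') (pvIdx_some_lt h2')

theorem pvApp_comm (idx : PySem.Dict String Int) (m : List (List Int)) (x y : (String × String) × Int) :
    pvApplyCount idx (pvApplyCount idx m x) y = pvApplyCount idx (pvApplyCount idx m y) x := by
  simp only [pvApplyCount_eq]; exact pvBump_comm ..

theorem pvApp_merge (idx : PySem.Dict String Int) (m : List (List Int)) (p : String × String) (c1 c2 : Int) :
    pvApplyCount idx (pvApplyCount idx m (p, c1)) (p, c2) = pvApplyCount idx m (p, c1 + c2) := by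
  simp only [pvApplyCount_eq]; exact pvBump_merge ..

theorem pvFoldl_app_comm (idx : PySem.Dict String Int) (l : List ((String × String) × Int))
    (m : List (List Int)) (x : (String × String) × Int) :
    l.foldl (pvApplyCount idx) (pvApplyCount idx m x) = pvApplyCount idx (l.foldl (pvApplyCount idx) m) x := by
  induction l generalizing m with
  | nil => rfl
  | cons q r ih => simp only [List.foldl_cons, pvApp_comm idx m x q, ih]

theorem pvFoldl_bumpentry (idx : PySem.Dict String Int) (p : String × String) (c : Int)
    (l : List ((String × String) × Int)) (m : List (List Int))
    (hnd : (l.map (·.1)).Nodup) (hmem : (p, c) ∈ l) :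
    (l.map (fun q => if q.1 == p then (p, c + 1) else q)).foldl (pvApplyCount idx) m
      = pvApplyCount idx (l.foldl (pvApplyCount idx) m) (p, 1) := by
  induction l generalizing m with
  | nil => simp at hmem
  | cons q r ih =>
    simp only [List.map, List.nodup_cons] at hnd
    by_cases hq : q.1 = p
    · -- q is THE entry with key p; so q = (p, c) and r contains no key p
      have hqr : ∀ x ∈ r, x.1 ≠ p := by
        intro x hx hxp
        exact hnd.1 (by rw [← hq, ← hxp] at *; exact List.mem_map_of_mem hx)
      have hqc : q = (p, c) := by
        rcases List.mem_cons.mp hmem with h | h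
        · exact h.symm
        · exact absurd rfl (hqr (p, c) h)
      have hmapid : r.map (fun x => if x.1 == p then (p, c + 1) else x) = r := by
        conv_rhs => rw [← List.map_id r]
        exact List.map_congr_left (fun x hx => by simp [hqr x hx])
      have hq1 : (q.1 == p) = true := by simpa using hq
      simp only [List.map, List.foldl_cons, hmapid, hqc, beq_self_eq_true, if_true]
      rw [show pvApplyCount idx m (p, c + 1) = pvApplyCount idx (pvApplyCount idx m (p, c)) (p, 1) from
        (pvApp_merge idx m p c 1).symm, pvFoldl_app_comm]
    · have : (q.1 == p) = false := by simpa using hq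
      simp only [List.map_cons, this, List.foldl_cons, Bool.false_eq_true, if_false]
      have hmem' : (p, c) ∈ r := by
        rcases List.mem_cons.mp hmem with h | h
        · exact absurd (by rw [← h]) hq
        · exact h
      exact ih (pvApplyCount idx m q) hnd.2 hmem'

theorem pvCounter_fold (idx : PySem.Dict String Int) (P : List (String × String)) (m : List (List Int)) :
    (PySem.Dict.counter P).items.foldl (pvApplyCount idx) m
      = P.foldl (fun m p => pvApplyCount idx m (p, 1)) m := by
  induction P using List.reverseRecOn generalizing m with
  | nil => rfl
  | append_singleton P p ih =>
    rw [PySem.Dict.counter_append_singleton, PySem.Dict.modify, List.foldl_append, List.foldl_cons,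
      List.foldl_nil]
    by_cases hc : (PySem.Dict.counter P).contains p
    · have hsome : ((PySem.Dict.counter P).get? p).isSome := by
        rw [← PySem.Dict.contains_eq_isSome_get?]; exact hc
      obtain ⟨v, hv⟩ := Option.isSome_iff_exists.mp hsome
      have hvD : (PySem.Dict.counter P).getD p 0 = v :=
        PySem.Dict.getD_of_get?_eq_some _ 0 hv
      have hmem : (p, v) ∈ (PySem.Dict.counter P).items := PySem.Dict.mem_items_of_get?_eq_some _ hv
      rw [PySem.Dict.items_insert_of_contains _ _ hc, hvD]
      rw [pvFoldl_bumpentry idx p v _ m (PySem.Dict.nodup_keys_counter P) hmem, ih]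
    · rw [PySem.Dict.items_insert_of_not_contains _ _ (by simpa using hc),
        PySem.Dict.getD_of_not_contains _ 0 (by simpa using hc), List.foldl_append,
        List.foldl_cons, List.foldl_nil, ih]
      norm_num

theorem pvFoldlRangeZip {β : Type} (ws : List String) (g : β → String → String → β) (init : β) :
    (List.range (ws.length - 1)).foldl (fun m k => g m (ws.getD k "") (ws.getD (k + 1) "")) init
      = (ws.zip ws.tail).foldl (fun m p => g m p.1 p.2) init := by
  induction ws generalizing init with
  | nil => rfl
  | cons w t ih =>
    cases t with
    | nil => rfl
    | cons w2 r =>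
      have hlen : (w :: w2 :: r).length - 1 = r.length + 1 := by simp
      rw [hlen, List.range_succ_eq_map, List.foldl_cons, List.foldl_map]
      have hstep : ∀ (m : β) (k : Nat),
          g m ((w :: w2 :: r).getD (Nat.succ k) "") ((w :: w2 :: r).getD (Nat.succ k + 1) "")
            = g m ((w2 :: r).getD k "") ((w2 :: r).getD (k + 1) "") := by
        intro m k; rfl
      simp only [hstep]
      have := ih (g init w w2)
      simp only [List.length_cons, Nat.add_sub_cancel] at this
      simpa using this

theorem pvA_eq_zip (words : List String) (mat : List (List Int)) (index : List (String × Int)) :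
    get_next_word_counts words mat index
      = (words.zip words.tail).foldl
          (fun m p => pvApplyCount (PySem.Dict.ofList index) m (p, 1)) mat := by
  unfold get_next_word_counts
  rw [PySem.List.pyRange_one, List.foldl_map]
  have htn : ((words.length : Int) - 1 - 0).toNat = words.length - 1 := by omega
  rw [htn]
  have hbody : ∀ (m : List (List Int)) (k : Nat),
      (fun (mat : List (List Int)) (i : Int) =>
        let word1 := PySem.List.pyGetD words i ""
        let word2 := PySem.List.pyGetD words (i + 1) ""
        let word1_index := (PySem.Dict.ofList index).getD word1 0
        let word2_index := (PySem.Dict.ofList index).getD word2 0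
        let row := PySem.List.pyGetD mat word1_index []
        PySem.List.pySetD mat word1_index
          (PySem.List.pySetD row word2_index (PySem.List.pyGetD row word2_index 0 + 1))) m (0 + (k : Int))
        = pvApplyCount (PySem.Dict.ofList index) m ((words.getD k "", words.getD (k + 1) ""), 1) := by
    intro m k
    simp only [pvApplyCount, zero_add]
    have g1 : PySem.List.pyGetD words ((k : Int)) "" = words.getD k "" := by
      simp
    have g2 : PySem.List.pyGetD words ((k : Int) + 1) "" = words.getD (k + 1) "" := by
      rw [show ((k : Int) + 1) = ((k + 1 : Nat) : Int) by push_cast; ring,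
        PySem.List.pyGetD_natCast]
    rw [g1, g2]
  simp only [hbody]
  exact pvFoldlRangeZip words
    (fun m w1 w2 => pvApplyCount (PySem.Dict.ofList index) m ((w1, w2), 1)) mat

-- ===== VERDICT (by name: the statement is the Claim_ definition above) =====
theorem get_next_word_counts_spec : Claim_equal_get_next_word_counts := by
  intro words mat index _ _
  unfold Spec_get_next_word_counts get_next_word_counts_alt
  rw [pvA_eq_zip, PySem.List.slice_from_one, PySem.Dict.foldl_insert_getD_add_one_eq_counter,
    pvCounter_fold]
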